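-- pv_equiv track=rewrite | github.com/germanfica/tesseract | gen_subs_from_frames_unique.py | build_overrides_from_segments
-- ===== SOURCE A (Python) =====
-- from typing import List, Tuple, Optional, Dict
--
-- def build_overrides_from_segments(
--     segs: list[tuple[int, str, int, str]],
--     unique_name_set: set[str],
-- ) -> Dict[str, tuple[int, int]]:
--     """
--     Devuelve overrides por nombre de archivo (start_name) SOLO si existe en frames_unique/.
--     Si hay varias filas para el mismo nombre (reapariciones), toma la de menor start_idx.
--     """
--     overrides: Dict[str, tuple[int, int]] = {}
--     for s_idx, s_name, e_idx, _e_name in segs: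
--         if s_name not in unique_name_set:
--             continue
--
--         # normaliza rango
--         if e_idx < s_idx:
--             s_idx, e_idx = e_idx, s_idx
--
--         if s_name not in overrides:
--             overrides[s_name] = (s_idx, e_idx)
--         else:
--             prev_s, _prev_e = overrides[s_name]
--             if s_idx < prev_s:
--                 overrides[s_name] = (s_idx, e_idx)
--
--     return overrides
-- ===== SOURCE B (Python) =====
-- from typing import Dict
--
-- def build_overrides_from_segments(
--     segs: list[tuple[int, str, int, str]],
--     unique_name_set: set[str],
-- ) -> Dict[str, tuple[int, int]]:
--     # Pass 1: keep only names in unique_name_set, normalize each range.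
--     rows = [
--         (s_name, (e_idx, s_idx) if e_idx < s_idx else (s_idx, e_idx))
--         for s_idx, s_name, e_idx, _e_name in segs
--         if s_name in unique_name_set
--     ]
--     # Pass 2: group normalized ranges per name (insertion order preserved).
--     groups: Dict[str, list[tuple[int, int]]] = {}
--     for name, pair in rows:
--         groups.setdefault(name, []).append(pair)
--     # Pass 3: pick the earliest-start range per name (min keeps the first minimum).
--     return {name: min(pairs, key=lambda p: p[0]) for name, pairs in groups.items()}
-- ===== Notes on version B (the rewrite author's own statement) =====
-- stated objective: alternative
-- what changed: Replaces A's single online min-fold into the result dict by a three-pass group-then-reduce: filter+normalize rows, group pairs per name into a dict of lists, then pick min(pairs, key=start) per group.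
import Mathlib
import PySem

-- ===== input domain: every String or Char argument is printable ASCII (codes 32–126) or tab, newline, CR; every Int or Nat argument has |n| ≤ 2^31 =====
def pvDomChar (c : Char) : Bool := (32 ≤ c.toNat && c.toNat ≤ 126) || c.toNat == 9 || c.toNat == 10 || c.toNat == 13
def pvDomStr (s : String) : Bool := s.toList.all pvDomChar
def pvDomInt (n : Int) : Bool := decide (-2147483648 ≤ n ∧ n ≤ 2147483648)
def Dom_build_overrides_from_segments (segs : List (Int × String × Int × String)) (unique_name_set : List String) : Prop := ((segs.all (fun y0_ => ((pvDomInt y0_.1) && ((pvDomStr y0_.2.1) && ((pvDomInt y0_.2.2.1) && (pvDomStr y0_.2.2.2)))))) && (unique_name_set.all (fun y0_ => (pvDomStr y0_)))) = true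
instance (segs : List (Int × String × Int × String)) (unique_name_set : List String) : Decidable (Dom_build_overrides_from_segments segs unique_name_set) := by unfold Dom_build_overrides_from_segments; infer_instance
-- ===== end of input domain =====

-- B replaces A's online min-fold by filter+normalize, group-into-lists, then a min-per-group pass (objective: alternative decomposition).

-- ===== PORT A =====
-- one iteration of A's loop body, on one (s_idx, s_name, e_idx, _e_name) row
def pvStepA (unique_name_set : List String) (overrides : PySem.Dict String (Int × Int))
    (seg : Int × String × Int × String) : PySem.Dict String (Int × Int) :=
  if unique_name_set.contains seg.2.1 then
    -- normaliza rango
    let p := if seg.2.2.1 < seg.1 then (seg.2.2.1, seg.1) else (seg.1, seg.2.2.1)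
    match overrides.get? seg.2.1 with
    | none => overrides.insert seg.2.1 p
    | some prev => if p.1 < prev.1 then overrides.insert seg.2.1 p else overrides
  else overrides

def build_overrides_from_segments (segs : List (Int × String × Int × String)) (unique_name_set : List String) : List (String × Int × Int) :=
  (segs.foldl (pvStepA unique_name_set) PySem.Dict.empty).items

-- ===== PORT B =====
-- pass 1 of Source B: the filtered, normalized rows (a list comprehension)
def pvRows (segs : List (Int × String × Int × String)) (unique_name_set : List String) : List (String × Int × Int) :=
  segs.filterMap (fun seg =>
    if unique_name_set.contains seg.2.1 then
      some (seg.2.1, if seg.2.2.1 < seg.1 then (seg.2.2.1, seg.1) else (seg.1, seg.2.2.1))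
    else none)

def build_overrides_from_segments_alt (segs : List (Int × String × Int × String)) (unique_name_set : List String) : List (String × Int × Int) :=
  -- pass 2: group pairs per name (setdefault(...).append)
  let groups : PySem.Dict String (List (Int × Int)) :=
    (pvRows segs unique_name_set).foldl (fun g r => g.modify r.1 [] (fun l => l ++ [r.2])) PySem.Dict.empty
  -- pass 3: dict comprehension taking min by start (min keeps the first minimum)
  groups.items.map (fun kv => (kv.1, PySem.List.minD kv.2 (fun p => p.1) (0, 0)))

-- ===== PRECONDITION & SPEC =====
def Spec_build_overrides_from_segments (segs : List (Int × String × Int × String)) (unique_name_set : List String) (out : List (String × Int × Int)) : Prop := out = build_overrides_from_segments_alt segs unique_name_set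
instance (segs : List (Int × String × Int × String)) (unique_name_set : List String) (out : List (String × Int × Int)) : Decidable (Spec_build_overrides_from_segments segs unique_name_set out) := by unfold Spec_build_overrides_from_segments; infer_instance

-- ===== CLAIM (what is proved, stated in full; the proofs are below) =====
def Claim_equal_build_overrides_from_segments : Prop := ∀ (segs : List (Int × String × Int × String)) (unique_name_set : List String), Dom_build_overrides_from_segments segs unique_name_set → Spec_build_overrides_from_segments segs unique_name_set (build_overrides_from_segments segs unique_name_set)

-- ===== LEMMAS AND PROOFS =====

-- A's fold over segs is the same fold restricted to the filtered, normalized rows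
def pvStepA' (d : PySem.Dict String (Int × Int)) (r : String × Int × Int) : PySem.Dict String (Int × Int) :=
  match d.get? r.1 with
  | none => d.insert r.1 r.2
  | some prev => if r.2.1 < prev.1 then d.insert r.1 r.2 else d

lemma pvRows_cons (seg : Int × String × Int × String) (rest : List (Int × String × Int × String)) (uns : List String) :
    pvRows (seg :: rest) uns =
      (if uns.contains seg.2.1 then
        [(seg.2.1, if seg.2.2.1 < seg.1 then (seg.2.2.1, seg.1) else (seg.1, seg.2.2.1))]
      else []) ++ pvRows rest uns := by
  simp only [pvRows, List.filterMap_cons]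
  split <;> simp_all

lemma foldA_eq_fold_rows (uns : List String) :
    ∀ (segs : List (Int × String × Int × String)) (d : PySem.Dict String (Int × Int)),
    segs.foldl (pvStepA uns) d = (pvRows segs uns).foldl pvStepA' d := by
  intro segs
  induction segs with
  | nil => intro d; rfl
  | cons seg rest ih =>
    intro d
    rw [List.foldl_cons, ih, pvRows_cons]
    by_cases h : uns.contains seg.2.1
    · rw [if_pos h, List.singleton_append, List.foldl_cons]
      congr 1
      simp only [pvStepA, pvStepA', h, if_pos]
    · rw [if_neg h, List.nil_append]
      congr 1
      simp only [pvStepA, h]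
      simp

def pvMinStep (acc : Option (Int × Int)) (x : Int × Int) : Option (Int × Int) :=
  match acc with
  | none => some x
  | some m => if x.1 < m.1 then some x else some m

lemma min?_eq_foldl (l : List (Int × Int)) :
    PySem.List.min? l (fun q => q.1) = List.foldl pvMinStep none l := by
  rw [PySem.List.min?]
  congr 1
  funext acc x
  cases acc <;> rfl

lemma min?_append_singleton (l : List (Int × Int)) (p : Int × Int) :
    PySem.List.min? (l ++ [p]) (fun q => q.1) =
      match PySem.List.min? l (fun q => q.1) with
      | none => some p
      | some q => if p.1 < q.1 then some p else some q := by
  rw [min?_eq_foldl, min?_eq_foldl, List.foldl_append, List.foldl_cons, List.foldl_nil]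
  cases h : List.foldl pvMinStep none l <;> rfl

-- the invariant tying A's dict to B's groups dict
lemma fold_invariant :
    ∀ (rows : List (String × Int × Int)) (d : PySem.Dict String (Int × Int))
      (g : PySem.Dict String (List (Int × Int))),
    d.keys = g.keys → d.keys.Nodup →
    (∀ k, d.get? k = PySem.List.min? (g.getD k []) (fun q => q.1)) →
    (let d' := rows.foldl pvStepA' d
     let g' := rows.foldl (fun g r => g.modify r.1 [] (fun l => l ++ [r.2])) g
     d'.keys = g'.keys ∧ d'.keys.Nodup ∧
     (∀ k, d'.get? k = PySem.List.min? (g'.getD k []) (fun q => q.1))) := by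
  intro rows
  induction rows with
  | nil => intro d g h1 h2 h3; exact ⟨h1, h2, h3⟩
  | cons r rest ih =>
    intro d g h1 h2 h3
    simp only [List.foldl_cons]
    apply ih
    -- key facts about the one-step updates
    case a =>
      -- keys equal after one step
      rw [PySem.Dict.keys_modify]
      by_cases hc : d.contains r.1
      · have hcg : g.contains r.1 = true := by
          rw [PySem.Dict.contains_eq_decide_mem_keys] at hc ⊢
          rw [← h1]; exact hc
        rw [PySem.Dict.keys_insert_of_contains g _ hcg]
        have hsome : (d.get? r.1).isSome := by
          rw [← PySem.Dict.contains_eq_isSome_get?]; exact hc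
        cases hd : d.get? r.1 with
        | none => simp [hd] at hsome
        | some prev =>
          simp only [pvStepA', hd]
          by_cases hlt : r.2.1 < prev.1
          · rw [if_pos hlt, PySem.Dict.keys_insert_of_contains d _ hc]; exact h1
          · rw [if_neg hlt]; exact h1
      · rw [Bool.not_eq_true] at hc
        have hcg : g.contains r.1 = false := by
          rw [PySem.Dict.contains_eq_decide_mem_keys] at hc ⊢
          rw [← h1]; exact hc
        have hnone : d.get? r.1 = none := by
          have h := PySem.Dict.contains_eq_isSome_get? d r.1
          rw [hc] at h
          cases hd : d.get? r.1 with
          | none => rfl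
          | some v => rw [hd] at h; simp at h
        simp only [pvStepA', hnone]
        rw [PySem.Dict.keys_insert_of_not_contains d _ hc,
            PySem.Dict.keys_insert_of_not_contains g _ hcg, h1]
    case a =>
      -- nodup after one step
      cases hd : d.get? r.1 with
      | none =>
        simp only [pvStepA', hd]
        exact PySem.Dict.nodup_keys_insert d r.1 r.2 h2
      | some prev =>
        simp only [pvStepA', hd]
        by_cases hlt : r.2.1 < prev.1
        · rw [if_pos hlt]; exact PySem.Dict.nodup_keys_insert d r.1 r.2 h2
        · rw [if_neg hlt]; exact h2
    case a =>
      -- pointwise min relation after one step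
      intro k
      by_cases hk : k = r.1
      · subst hk
        have hmod : (g.modify r.1 [] (fun l => l ++ [r.2])).getD r.1 [] = g.getD r.1 [] ++ [r.2] := by
          rw [PySem.Dict.getD_modify, if_pos rfl]
        rw [hmod, min?_append_singleton, ← h3 r.1]
        cases hd : d.get? r.1 with
        | none => simp [pvStepA', hd]
        | some prev =>
          simp only [pvStepA', hd]
          by_cases hlt : r.2.1 < prev.1
          · simp [hlt]
          · simp [hlt, hd]
      · have hmod : (g.modify r.1 [] (fun l => l ++ [r.2])).getD k [] = g.getD k [] := by
          rw [PySem.Dict.getD_modify, if_neg hk]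
        rw [hmod, ← h3 k]
        cases hd : d.get? r.1 with
        | none => simp [pvStepA', hd, PySem.Dict.get?_insert, hk]
        | some prev =>
          simp only [pvStepA', hd]
          by_cases hlt : r.2.1 < prev.1
          · rw [if_pos hlt, PySem.Dict.get?_insert, if_neg hk]
          · rw [if_neg hlt]

-- ===== VERDICT (by name: the statement is the Claim_ definition above) =====
theorem build_overrides_from_segments_spec : Claim_equal_build_overrides_from_segments := by
  intro segs uns _
  unfold Spec_build_overrides_from_segments
  have halt : build_overrides_from_segments_alt segs uns =
      ((pvRows segs uns).foldl (fun g r => g.modify r.1 [] (fun l => l ++ [r.2]))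
        PySem.Dict.empty).items.map (fun kv => (kv.1, PySem.List.minD kv.2 (fun p => p.1) (0, 0))) := rfl
  rw [halt]
  unfold build_overrides_from_segments
  rw [foldA_eq_fold_rows]
  have base3 : ∀ k, (PySem.Dict.empty : PySem.Dict String (Int × Int)).get? k
      = PySem.List.min? ((PySem.Dict.empty : PySem.Dict String (List (Int × Int))).getD k []) (fun q => q.1) := by
    intro k; simp [PySem.Dict.get?_empty, PySem.Dict.getD_empty, PySem.List.min?]
  obtain ⟨hkeys, hnd, hmin⟩ := fold_invariant (pvRows segs uns) PySem.Dict.empty PySem.Dict.empty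
    rfl (by simp [PySem.Dict.keys_empty]) base3
  set d' := (pvRows segs uns).foldl pvStepA' PySem.Dict.empty with hd'
  set g' := (pvRows segs uns).foldl (fun g r => g.modify r.1 [] (fun l => l ++ [r.2])) PySem.Dict.empty with hg'
  have hndg : g'.keys.Nodup := hkeys ▸ hnd
  rw [PySem.Dict.items_eq_map_keys d' hnd (0, 0),
      PySem.Dict.items_eq_map_keys g' hndg [], List.map_map, hkeys]
  apply List.map_congr_left
  intro k _
  simp only [Function.comp]
  rw [PySem.Dict.getD_eq_get?_getD, hmin k, PySem.List.minD]
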